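-- pv_equiv track=rewrite | github.com/ChinmayyK/BlockVault | blockvault/api/files.py | _collapse_visible_file_docs
-- ===== SOURCE A (Python) =====
-- from typing import Dict, Any, List, Optional, Tuple
--
-- def _doc_sort_key_for_listing(doc: Dict[str, Any]) -> Tuple[int, str]:
--     created_at = int(doc.get("created_at") or 0)
--     return created_at, str(doc.get("_id") or "")
--
-- def _collapse_visible_file_docs(docs: List[Dict[str, Any]]) -> List[Dict[str, Any]]:
--     """Keep only the latest redacted copy per source file in file listings.
--
--     Users create a new redacted file on each apply step. Older redacted copies
--     are still stored for audit/proof purposes, but they should not continue to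
--     appear as separate cards in the main dashboard after refresh.
--     """
--     visible: List[Dict[str, Any]] = []
--     seen_redaction_sources: set[str] = set()
--
--     for doc in sorted(docs, key=_doc_sort_key_for_listing, reverse=True):
--         redacted_from = doc.get("redacted_from")
--         if redacted_from:
--             source_key = str(redacted_from)
--             if source_key in seen_redaction_sources:
--                 continue
--             seen_redaction_sources.add(source_key)
--
--         visible.append(doc)
--
--     return visible
-- ===== SOURCE B (Python) =====
-- from typing import Dict, Any, List, Tuple
--
-- def _doc_sort_key_for_listing(doc: Dict[str, Any]) -> Tuple[int, str]:
--     created_at = int(doc.get("created_at") or 0)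
--     return created_at, str(doc.get("_id") or "")
--
-- def _collapse_visible_file_docs(docs: List[Dict[str, Any]]) -> List[Dict[str, Any]]:
--     """One pass: keep, per source, the doc with the strictly largest sort key
--     (earliest on ties); then sort the surviving docs once, newest first."""
--     best: Dict[str, Tuple[Tuple[int, str], int]] = {}
--     for i, doc in enumerate(docs):
--         redacted_from = doc.get("redacted_from")
--         if redacted_from:
--             source_key = str(redacted_from)
--             key = _doc_sort_key_for_listing(doc)
--             if source_key not in best or key > best[source_key][0]:
--                 best[source_key] = (key, i)
--     winners = {i for _, i in best.values()}
--     selected = [doc for i, doc in enumerate(docs)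
--                 if not doc.get("redacted_from") or i in winners]
--     return sorted(selected, key=_doc_sort_key_for_listing, reverse=True)
-- ===== Notes on version B (the rewrite author's own statement) =====
-- stated objective: alternative
-- what changed: A sorts all docs descending and then drops every non-first doc per redaction source with a seen-set scan; B instead makes one unsorted pass keeping, per source, the index of the doc with the strictly largest sort key (earliest wins ties), filters the input by those winner indices, and sorts only the surviving docs once.
import Mathlib
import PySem

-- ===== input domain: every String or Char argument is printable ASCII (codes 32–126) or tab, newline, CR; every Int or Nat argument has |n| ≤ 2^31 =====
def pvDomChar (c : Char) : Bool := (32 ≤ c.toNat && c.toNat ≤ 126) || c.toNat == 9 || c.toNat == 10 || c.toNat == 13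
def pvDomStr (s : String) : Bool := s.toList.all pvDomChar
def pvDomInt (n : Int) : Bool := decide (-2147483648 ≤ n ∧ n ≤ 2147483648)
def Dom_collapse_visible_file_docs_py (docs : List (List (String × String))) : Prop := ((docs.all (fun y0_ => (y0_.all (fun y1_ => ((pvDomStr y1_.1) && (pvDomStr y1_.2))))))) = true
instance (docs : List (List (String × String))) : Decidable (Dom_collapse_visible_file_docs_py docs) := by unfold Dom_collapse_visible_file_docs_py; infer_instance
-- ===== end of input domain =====

-- B replaces A's sort-then-seen-set dedup by one unsorted pass that keeps, per redaction
-- source, the doc with the strictly largest sort key (earliest on ties), then sorts the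
-- survivors once (objective: alternative decomposition, same asymptotic cost).

-- ===== PORT A =====
-- doc.get(k) on the association-list doc (first match)
def pvGetKey (d : List (String × String)) (k : String) : Option String :=
  PySem.Dict.get? ⟨d⟩ k

-- int(doc.get("created_at") or 0); (ofStr? …).getD 0 is total — exact under Pre_ below
def pvCreated (d : List (String × String)) : Int :=
  match pvGetKey d "created_at" with
  | none => 0
  | some s => if s = "" then 0 else (PySem.Int.ofStr? s).getD 0

-- str(doc.get("_id") or "")
def pvId (d : List (String × String)) : String :=
  match pvGetKey d "_id" with
  | none => ""
  | some s => s

-- doc.get("redacted_from"), as `some` exactly when truthy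
def pvSrc (d : List (String × String)) : Option String :=
  match pvGetKey d "redacted_from" with
  | none => none
  | some s => if s = "" then none else some s

def collapse_visible_file_docs_py (docs : List (List (String × String))) : List (List (String × String)) :=
  (List.foldl
    (fun (st : List (List (String × String)) × PySem.Set String) d =>
      match pvSrc d with
      | some sk => if st.2.contains sk then st else (st.1 ++ [d], PySem.Set.add st.2 sk)
      | none => (st.1 ++ [d], st.2))
    ([], PySem.Set.empty)
    (PySem.List.sorted2 docs pvCreated pvId true)).1

-- ===== PORT B =====
def pvKey (d : List (String × String)) : Int × String := (pvCreated d, pvId d)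

-- Python tuple comparison  key > best[sk][0]  on (int, str)
def pvGtKey (a b : Int × String) : Bool :=
  decide (b.1 < a.1) || (a.1 == b.1 && decide (b.2 < a.2))

-- first pass of B: source_key -> (best sort key, index of its doc)
def pvBest (docs : List (List (String × String))) : PySem.Dict String ((Int × String) × Int) :=
  List.foldl
    (fun (best : PySem.Dict String ((Int × String) × Int)) p =>
      match pvSrc p.2 with
      | some sk =>
        match best.get? sk with
        | none => best.insert sk (pvKey p.2, p.1)
        | some q => if pvGtKey (pvKey p.2) q.1 then best.insert sk (pvKey p.2, p.1) else best
      | none => best)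
    ⟨[]⟩ (PySem.List.enumerate docs)

-- Source B's `selected` list
def pvSelected (docs : List (List (String × String))) : List (List (String × String)) :=
  ((PySem.List.enumerate docs).filter
     (fun p =>
       match pvSrc p.2 with
       | none => true
       | some _ => (PySem.Set.ofList (((pvBest docs).values).map (·.2))).contains p.1)).map (·.2)

def collapse_visible_file_docs_py_alt (docs : List (List (String × String))) : List (List (String × String)) :=
  PySem.List.sorted2 (pvSelected docs) pvCreated pvId true

-- ===== PRECONDITION & SPEC =====
-- Pre_ excludes exactly the inputs where Python raises ValueError: some doc whose
-- "created_at" value is a non-empty string that int() cannot parse.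
def Pre_collapse_visible_file_docs_py (docs : List (List (String × String))) : Prop :=
  (docs.all (fun d =>
    match pvGetKey d "created_at" with
    | none => true
    | some s => s == "" || (PySem.Int.ofStr? s).isSome)) = true
instance (docs : List (List (String × String))) : Decidable (Pre_collapse_visible_file_docs_py docs) := by
  unfold Pre_collapse_visible_file_docs_py; infer_instance

def pvWitness_collapse_visible_file_docs_py : (List (List (String × String))) :=
  [[("_id", "a"), ("created_at", "1"), ("redacted_from", "s")],
   [("_id", "b"), ("created_at", "2"), ("redacted_from", "s")],
   [("_id", "c"), ("created_at", "")]]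

def Spec_collapse_visible_file_docs_py (docs : List (List (String × String))) (out : List (List (String × String))) : Prop := out = collapse_visible_file_docs_py_alt docs
instance (docs : List (List (String × String))) (out : List (List (String × String))) : Decidable (Spec_collapse_visible_file_docs_py docs out) := by unfold Spec_collapse_visible_file_docs_py; infer_instance

-- ===== CLAIM (what is proved, stated in full; the proofs are below) =====
def Claim_equal_collapse_visible_file_docs_py : Prop := ∀ (docs : List (List (String × String))), Dom_collapse_visible_file_docs_py docs → Pre_collapse_visible_file_docs_py docs → Spec_collapse_visible_file_docs_py docs (collapse_visible_file_docs_py docs)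

-- ===== LEMMAS AND PROOFS =====

-- the comparator sorted2 … true actually uses
def pvBef (a b : List (String × String)) : Bool := pvGtKey (pvKey a) (pvKey b)

-- insertion sort with that comparator
def pvSrt (xs : List (List (String × String))) : List (List (String × String)) :=
  List.foldl (fun acc x => PySem.List.insertBy pvBef x acc) [] xs

-- A's dedup scan, as a recursion
def pvDed : List (List (String × String)) → PySem.Set String → List (List (String × String))
  | [], _ => []
  | d :: t, seen =>
    match pvSrc d with
    | some sk => if seen.contains sk then pvDed t seen else d :: pvDed t (PySem.Set.add seen sk)
    | none => d :: pvDed t seen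

def pvSortedD (M : List (List (String × String))) : Prop :=
  M.Pairwise (fun a b => pvGtKey (pvKey b) (pvKey a) = false)

-- ---- key-order facts ----
theorem pvGtKey_true_iff (a b : Int × String) :
    pvGtKey a b = true ↔ (b.1 < a.1 ∨ (a.1 = b.1 ∧ b.2 < a.2)) := by
  simp [pvGtKey]

theorem pvGtKey_false_iff (a b : Int × String) :
    pvGtKey a b = false ↔ (¬ b.1 < a.1 ∧ (a.1 = b.1 → ¬ b.2 < a.2)) := by
  rw [← Bool.not_eq_true, pvGtKey_true_iff]; tauto

theorem pvGtKey_irrefl (a : Int × String) : pvGtKey a a = false := by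
  rw [pvGtKey_false_iff]; exact ⟨lt_irrefl _, fun _ => lt_irrefl _⟩

theorem pvGtKey_asymm {a b : Int × String} (h : pvGtKey a b = true) : pvGtKey b a = false := by
  rw [pvGtKey_true_iff] at h; rw [pvGtKey_false_iff]
  constructor
  · rcases h with h | ⟨h1, h2⟩
    · exact lt_asymm h
    · omega
  · intro he
    rcases h with h | ⟨h1, h2⟩
    · omega
    · exact lt_asymm h2

theorem pvGtKey_trans {a b c : Int × String} (h1 : pvGtKey a b = true) (h2 : pvGtKey b c = true) :
    pvGtKey a c = true := by
  rw [pvGtKey_true_iff] at *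
  rcases h1 with h1 | ⟨h1, h1'⟩ <;> rcases h2 with h2 | ⟨h2, h2'⟩
  · exact Or.inl (lt_trans h2 h1)
  · omega
  · omega
  · exact Or.inr ⟨by omega, lt_trans h2' h1'⟩

theorem pvGtKey_gt_of_gt_of_nle {a b c : Int × String} (h1 : pvGtKey a b = true) (h2 : pvGtKey c b = false) :
    pvGtKey a c = true := by
  rw [pvGtKey_true_iff] at *; rw [pvGtKey_false_iff] at h2
  obtain ⟨h2, h2'⟩ := h2
  rcases h1 with h1 | ⟨h1, h1'⟩
  · exact Or.inl (by omega)
  · rcases lt_trichotomy c.1 b.1 with hh | hh | hh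
    · exact Or.inl (by omega)
    · refine Or.inr ⟨by omega, ?_⟩
      exact lt_of_le_of_lt (not_lt.mp (h2' hh)) h1'
    · exact absurd hh h2

-- ---- sorted2 is pvSrt ----
theorem bef_eq (a b : List (String × String)) :
    (decide (pvCreated b < pvCreated a) || (!decide (pvCreated a < pvCreated b) && decide (pvId b < pvId a)))
      = pvBef a b := by
  rcases lt_trichotomy (pvCreated a) (pvCreated b) with h | h | h
  · simp [pvBef, pvGtKey, pvKey, h, lt_asymm h]
    exact fun he => absurd he (ne_of_lt h)
  · simp [pvBef, pvGtKey, pvKey, h]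
  · simp [pvBef, pvGtKey, pvKey, h]

theorem srt_spec (xs : List (List (String × String))) :
    PySem.List.sorted2 xs pvCreated pvId true = pvSrt xs := by
  show List.foldl _ [] xs = _
  unfold pvSrt
  congr 1
  funext acc x
  congr 1
  funext a b
  exact bef_eq a b

theorem srt_append_singleton (xs : List (List (String × String))) (d : List (String × String)) :
    pvSrt (xs ++ [d]) = PySem.List.insertBy pvBef d (pvSrt xs) := by
  simp [pvSrt, List.foldl_append]

theorem mem_srt {y : List (String × String)} {xs : List (List (String × String))} :
    y ∈ pvSrt xs ↔ y ∈ xs := by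
  induction xs using List.reverseRecOn with
  | nil => simp [pvSrt]
  | append_singleton xs d ih =>
    rw [srt_append_singleton]
    simp [PySem.List.mem_insertBy, ih]
    tauto

theorem insertBy_eq_cons {d : List (String × String)} {l : List (List (String × String))}
    (h : ∀ z ∈ l, pvBef d z = true) : PySem.List.insertBy pvBef d l = d :: l := by
  cases l with
  | nil => simp [PySem.List.insertBy]
  | cons y t => simp [PySem.List.insertBy, h y (by simp)]

theorem insertBy_eq_of_not_bef {d y : List (String × String)} {l : List (List (String × String))}
    (h : ¬ pvBef d y = true) :
    PySem.List.insertBy pvBef d (y :: l) = y :: PySem.List.insertBy pvBef d l := by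
  simp [PySem.List.insertBy, h]

theorem insertBy_sorted {d : List (String × String)} {M : List (List (String × String))}
    (hM : pvSortedD M) : pvSortedD (PySem.List.insertBy pvBef d M) := by
  induction M with
  | nil => simp [PySem.List.insertBy, pvSortedD]
  | cons y t ih =>
    rw [pvSortedD, List.pairwise_cons] at hM
    obtain ⟨hy, ht⟩ := hM
    by_cases h : pvBef d y = true
    · rw [pvSortedD]
      simp only [PySem.List.insertBy, h, if_pos]
      refine List.Pairwise.cons ?_ (List.Pairwise.cons hy ht)
      intro z hz
      rcases List.mem_cons.mp hz with rfl | hz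
      · exact pvGtKey_asymm h
      · exact pvGtKey_asymm (pvGtKey_gt_of_gt_of_nle h (hy z hz))
    · rw [pvSortedD]
      simp only [PySem.List.insertBy, h, if_neg, Bool.not_eq_true]
      refine List.Pairwise.cons ?_ (ih ht)
      intro z hz
      rcases (PySem.List.mem_insertBy pvBef d z t).mp hz with rfl | hz
      · exact Bool.not_eq_true _ ▸ (by simpa using h)
      · exact hy z hz
theorem srt_sorted (xs : List (List (String × String))) : pvSortedD (pvSrt xs) := by
  induction xs using List.reverseRecOn with
  | nil => exact List.Pairwise.nil
  | append_singleton xs d ih => rw [srt_append_singleton]; exact insertBy_sorted ih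
-- ---- dedup-scan facts ----
theorem set_contains_add (seen : PySem.Set String) (x s : String) :
    (PySem.Set.add seen x).contains s = (seen.contains s || s == x) := by
  simp only [PySem.Set.contains, List.contains_eq_mem]
  by_cases h : s = x <;> simp [PySem.Set.mem_add, h]

theorem ded_cons_none {y : List (String × String)} {t : List (List (String × String))}
    {seen : PySem.Set String} (hs : pvSrc y = none) :
    pvDed (y :: t) seen = y :: pvDed t seen := by
  simp only [pvDed, hs]

theorem ded_cons_seen {y : List (String × String)} {t : List (List (String × String))}
    {seen : PySem.Set String} {sk : String} (hs : pvSrc y = some sk)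
    (hc : seen.contains sk = true) :
    pvDed (y :: t) seen = pvDed t seen := by
  simp only [pvDed, hs]; rw [if_pos hc]

theorem ded_cons_new {y : List (String × String)} {t : List (List (String × String))}
    {seen : PySem.Set String} {sk : String} (hs : pvSrc y = some sk)
    (hc : ¬ seen.contains sk = true) :
    pvDed (y :: t) seen = y :: pvDed t (PySem.Set.add seen sk) := by
  simp only [pvDed, hs]; rw [if_neg hc]

theorem set_mem_iff_contains {α : Type} [BEq α] [LawfulBEq α] (s : PySem.Set α) (x : α) :
    x ∈ s ↔ s.contains x = true := by
  simp [PySem.Set.contains, List.contains_eq_mem]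

theorem ded_congr_seen {M : List (List (String × String))} : ∀ {s1 s2 : PySem.Set String},
    (∀ s, s1.contains s = s2.contains s) → pvDed M s1 = pvDed M s2 := by
  induction M with
  | nil => intro s1 s2 h; rfl
  | cons d t ih =>
    intro s1 s2 h
    cases hs : pvSrc d with
    | none => simp only [pvDed, hs]; rw [ih h]
    | some sk =>
      simp only [pvDed, hs, h sk]
      by_cases hc : s2.contains sk = true
      · rw [if_pos hc, if_pos hc, ih h]
      · rw [if_neg hc, if_neg hc,
          ih (s1 := PySem.Set.add s1 sk) (s2 := PySem.Set.add s2 sk) (fun s => by simp only [set_contains_add, h s])]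

theorem mem_ded {y : List (String × String)} {M : List (List (String × String))} {seen : PySem.Set String}
    (h : y ∈ pvDed M seen) : y ∈ M := by
  induction M generalizing seen with
  | nil => simpa [pvDed] using h
  | cons d t ih =>
    cases hs : pvSrc d with
    | none =>
      simp only [pvDed, hs] at h
      rcases List.mem_cons.mp h with rfl | h
      · exact List.mem_cons_self
      · exact List.mem_cons_of_mem _ (ih h)
    | some sk =>
      simp only [pvDed, hs] at h
      by_cases hc : seen.contains sk = true
      · rw [if_pos hc] at h; exact List.mem_cons_of_mem _ (ih h)
      · rw [if_neg hc] at h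
        rcases List.mem_cons.mp h with rfl | h
        · exact List.mem_cons_self
        · exact List.mem_cons_of_mem _ (ih h)

theorem ded_no_seen {M : List (List (String × String))} : ∀ {seen : PySem.Set String} {sk : String},
    seen.contains sk = true → ∀ y ∈ pvDed M seen, pvSrc y ≠ some sk := by
  induction M with
  | nil => intro seen sk h y hy; simp [pvDed] at hy
  | cons d t ih =>
    intro seen sk h y hy
    cases hs : pvSrc d with
    | none =>
      simp only [pvDed, hs] at hy
      rcases List.mem_cons.mp hy with rfl | hy
      · simp [hs]
      · exact ih h y hy
    | some sk' =>
      simp only [pvDed, hs] at hy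
      by_cases hc : seen.contains sk' = true
      · rw [if_pos hc] at hy; exact ih h y hy
      · rw [if_neg hc] at hy
        rcases List.mem_cons.mp hy with rfl | hy
        · rw [hs]; intro he; injection he with he; subst he; exact hc h
        · exact ih (by rw [set_contains_add, h]; rfl) y hy

theorem ded_add_filter (M : List (List (String × String))) : ∀ (seen : PySem.Set String) (sk : String),
    pvDed M (PySem.Set.add seen sk) = (pvDed M seen).filter (fun y => !(pvSrc y == some sk)) := by
  induction M with
  | nil => intro seen sk; rfl
  | cons d t ih =>
    intro seen sk
    cases hs : pvSrc d with
    | none =>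
      simp only [pvDed, hs, List.filter_cons]
      simp only [show (!((none : Option String) == some sk)) = true from rfl, if_pos]
      rw [ih seen sk]
    | some sk' =>
      by_cases he : sk' = sk
      · subst he
        have hadd : (PySem.Set.add seen sk').contains sk' = true := by
          rw [set_contains_add]; simp
        simp only [pvDed, hs]
        rw [if_pos hadd]
        by_cases hc : seen.contains sk' = true
        · rw [if_pos hc, ih seen sk']
        · rw [if_neg hc, List.filter_cons]
          have hdrop : (!(pvSrc d == some sk')) = false := by simp [hs]
          rw [hdrop, if_neg (by simp)]
          rw [List.filter_eq_self.mpr]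
          intro y hy
          have := ded_no_seen (M := t) (seen := PySem.Set.add seen sk') (sk := sk') hadd y hy
          simpa using this
      · have hadd : (PySem.Set.add seen sk).contains sk' = seen.contains sk' := by
          rw [set_contains_add]; simp [he]
        simp only [pvDed, hs]
        rw [hadd]
        by_cases hc : seen.contains sk' = true
        · rw [if_pos hc, if_pos hc, ih seen sk]
        · rw [if_neg hc, if_neg hc, List.filter_cons]
          have hkeep : (!(pvSrc d == some sk)) = true := by simp [hs, he]
          rw [hkeep, if_pos rfl]
          rw [← ih (PySem.Set.add seen sk') sk]
          refine congrArg _ (ded_congr_seen ?_)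
          intro s
          rw [set_contains_add, set_contains_add, set_contains_add, set_contains_add]
          cases seen.contains s <;> cases h1 : s == sk <;> cases h2 : s == sk' <;> rfl

-- inserting a non-redacted doc commutes with the dedup scan
theorem ded_insert_none {d : List (String × String)} {M : List (List (String × String))}
    (hd : pvSrc d = none) (hM : pvSortedD M) : ∀ (seen : PySem.Set String),
    pvDed (PySem.List.insertBy pvBef d M) seen = PySem.List.insertBy pvBef d (pvDed M seen) := by
  induction M with
  | nil => intro seen; simp [PySem.List.insertBy, pvDed, hd]
  | cons y t ih =>
    intro seen
    rw [pvSortedD, List.pairwise_cons] at hM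
    obtain ⟨hy, ht⟩ := hM
    by_cases h : pvBef d y = true
    · simp only [PySem.List.insertBy, h, if_pos]
      rw [ded_cons_none hd]
      rw [insertBy_eq_cons]
      intro z hz
      rcases List.mem_cons.mp (mem_ded hz) with rfl | hz'
      · exact h
      · exact pvGtKey_gt_of_gt_of_nle h (hy z hz')
    · rw [insertBy_eq_of_not_bef h]
      cases hs : pvSrc y with
      | none =>
        rw [ded_cons_none hs, ded_cons_none hs, ih ht seen, insertBy_eq_of_not_bef h]
      | some sk =>
        by_cases hc : seen.contains sk = true
        · rw [ded_cons_seen hs hc, ded_cons_seen hs hc, ih ht seen]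
        · rw [ded_cons_new hs hc, ded_cons_new hs hc, ih ht _, insertBy_eq_of_not_bef h]

-- inserting a strictly-winning redacted doc replaces its source's survivor
theorem ded_insert_win {d : List (String × String)} {M : List (List (String × String))} {sk : String}
    (hd : pvSrc d = some sk) (hM : pvSortedD M)
    (hall : ∀ e ∈ M, pvSrc e = some sk → pvGtKey (pvKey d) (pvKey e) = true) :
    ∀ seen : PySem.Set String, seen.contains sk = false →
    pvDed (PySem.List.insertBy pvBef d M) seen =
      PySem.List.insertBy pvBef d ((pvDed M seen).filter (fun y => !(pvSrc y == some sk))) := by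
  induction M with
  | nil =>
    intro seen hc
    rw [show PySem.List.insertBy pvBef d [] = [d] from rfl,
      ded_cons_new hd (by rw [hc]; simp)]
    rfl
  | cons y t ih =>
    intro seen hc
    rw [pvSortedD, List.pairwise_cons] at hM
    obtain ⟨hy, ht⟩ := hM
    by_cases h : pvBef d y = true
    · simp only [PySem.List.insertBy, h, if_pos]
      rw [ded_cons_new hd (by rw [hc]; simp), ded_add_filter]
      rw [insertBy_eq_cons]
      intro z hz
      rcases List.mem_cons.mp (mem_ded (List.mem_of_mem_filter hz)) with rfl | hz'
      · exact h
      · exact pvGtKey_gt_of_gt_of_nle h (hy z hz')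
    · rw [insertBy_eq_of_not_bef h]
      cases hs : pvSrc y with
      | none =>
        rw [ded_cons_none hs, ded_cons_none hs,
          ih ht (fun e he => hall e (List.mem_cons_of_mem _ he)) seen hc, List.filter_cons]
        have hkeep : (!(pvSrc y == some sk)) = true := by simp [hs]
        rw [hkeep, if_pos rfl, insertBy_eq_of_not_bef h]
      | some sk' =>
        have hne : sk' ≠ sk := by
          intro he; subst he
          exact (by simp [h] : pvBef d y ≠ true) (hall y List.mem_cons_self hs)
        by_cases hcy : seen.contains sk' = true
        · rw [ded_cons_seen hs hcy, ded_cons_seen hs hcy,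
            ih ht (fun e he => hall e (List.mem_cons_of_mem _ he)) seen hc]
        · rw [ded_cons_new hs hcy, ded_cons_new hs hcy, List.filter_cons]
          have hkeep : (!(pvSrc y == some sk)) = true := by simp [hs, hne]
          rw [hkeep, if_pos rfl, insertBy_eq_of_not_bef h,
            ih ht (fun e he => hall e (List.mem_cons_of_mem _ he)) _
              (by rw [set_contains_add, hc]; simp [Ne.symm hne])]
-- inserting a losing redacted doc changes nothing
theorem ded_insert_lose {d : List (String × String)} {M : List (List (String × String))} {sk : String}
    (hd : pvSrc d = some sk) (hM : pvSortedD M) :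
    ∀ seen : PySem.Set String,
    (seen.contains sk = true ∨ ∃ w ∈ M, pvSrc w = some sk ∧ pvGtKey (pvKey d) (pvKey w) = false) →
    pvDed (PySem.List.insertBy pvBef d M) seen = pvDed M seen := by
  induction M with
  | nil =>
    intro seen hyp
    rcases hyp with hc | ⟨w, hw, _⟩
    · rw [show PySem.List.insertBy pvBef d [] = [d] from rfl, ded_cons_seen hd hc]
    · simp at hw
  | cons y t ih =>
    intro seen hyp
    rw [pvSortedD, List.pairwise_cons] at hM
    obtain ⟨hy, ht⟩ := hM
    by_cases h : pvBef d y = true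
    · have hc : seen.contains sk = true := by
        rcases hyp with hc | ⟨w, hw, hwsrc, hwle⟩
        · exact hc
        · exfalso
          rcases List.mem_cons.mp hw with rfl | hw'
          · rw [pvBef] at h; rw [h] at hwle; cases hwle
          · have := pvGtKey_gt_of_gt_of_nle (a := pvKey d) h (hy w hw')
            rw [this] at hwle; cases hwle
      simp only [PySem.List.insertBy, h, if_pos]
      rw [ded_cons_seen hd hc]
    · rw [insertBy_eq_of_not_bef h]
      cases hs : pvSrc y with
      | none =>
        rw [ded_cons_none hs, ded_cons_none hs, ih ht seen ?_]
        rcases hyp with hc | ⟨w, hw, hwsrc, hwle⟩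
        · exact Or.inl hc
        · rcases List.mem_cons.mp hw with rfl | hw'
          · rw [hs] at hwsrc; cases hwsrc
          · exact Or.inr ⟨w, hw', hwsrc, hwle⟩
      | some sk' =>
        by_cases hcy : seen.contains sk' = true
        · rw [ded_cons_seen hs hcy, ded_cons_seen hs hcy, ih ht seen ?_]
          rcases hyp with hc | ⟨w, hw, hwsrc, hwle⟩
          · exact Or.inl hc
          · rcases List.mem_cons.mp hw with rfl | hw'
            · rw [hs] at hwsrc; injection hwsrc with he; subst he; exact Or.inl hcy
            · exact Or.inr ⟨w, hw', hwsrc, hwle⟩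
        · rw [ded_cons_new hs hcy, ded_cons_new hs hcy, ih ht _ ?_]
          rcases hyp with hc | ⟨w, hw, hwsrc, hwle⟩
          · exact Or.inl (by rw [set_contains_add, hc]; rfl)
          · rcases List.mem_cons.mp hw with rfl | hw'
            · rw [hs] at hwsrc; injection hwsrc with he; subst he
              exact Or.inl (by rw [set_contains_add]; simp)
            · exact Or.inr ⟨w, hw', hwsrc, hwle⟩
-- stable sort commutes with filtering
theorem insertBy_filter {d : List (String × String)} {M : List (List (String × String))}
    (hM : pvSortedD M) (P : List (String × String) → Bool) :
    (PySem.List.insertBy pvBef d M).filter P =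
      if P d then PySem.List.insertBy pvBef d (M.filter P) else M.filter P := by
  induction M with
  | nil => cases hPd : P d <;> simp [PySem.List.insertBy, hPd]
  | cons y t ih =>
    rw [pvSortedD, List.pairwise_cons] at hM
    obtain ⟨hy, ht⟩ := hM
    by_cases h : pvBef d y = true
    · simp only [PySem.List.insertBy, h, if_pos]
      rw [List.filter_cons]
      cases hPd : P d with
      | false => simp
      | true =>
        simp only [if_pos rfl]
        rw [insertBy_eq_cons]
        intro z hz
        rcases List.mem_cons.mp (List.mem_of_mem_filter hz) with rfl | hz'
        · exact h
        · exact pvGtKey_gt_of_gt_of_nle h (hy z hz')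
    · rw [insertBy_eq_of_not_bef h, List.filter_cons, List.filter_cons]
      cases hPy : P y with
      | false =>
        simp only [Bool.false_eq_true, ↓reduceIte]
        exact ih ht
      | true =>
        simp only [if_pos rfl]
        rw [ih ht]
        cases hPd : P d with
        | false => simp
        | true => simp [insertBy_eq_of_not_bef h]
theorem srt_filter (l : List (List (String × String))) (P : List (String × String) → Bool) :
    pvSrt (l.filter P) = (pvSrt l).filter P := by
  induction l using List.reverseRecOn with
  | nil => rfl
  | append_singleton l d ih =>
    rw [List.filter_append, srt_append_singleton, insertBy_filter (srt_sorted l) P, List.filter_cons]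
    cases hPd : P d with
    | false => simpa using ih
    | true => simpa [srt_append_singleton] using congrArg (PySem.List.insertBy pvBef d) ih
-- ---- port A characterization ----
theorem foldA_spec (M : List (List (String × String))) :
    ∀ (acc : List (List (String × String))) (seen : PySem.Set String),
    (List.foldl
      (fun (st : List (List (String × String)) × PySem.Set String) d =>
        match pvSrc d with
        | some sk => if st.2.contains sk then st else (st.1 ++ [d], PySem.Set.add st.2 sk)
        | none => (st.1 ++ [d], st.2))
      (acc, seen) M).1 = acc ++ pvDed M seen := by
  induction M with
  | nil => intro acc seen; simp [pvDed]
  | cons d t ih =>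
    intro acc seen
    cases hs : pvSrc d with
    | none => simp only [List.foldl_cons, hs, pvDed]; rw [ih]; simp
    | some sk =>
      by_cases hc : seen.contains sk = true
      · simp only [List.foldl_cons, hs, pvDed]
        rw [if_pos hc, if_pos hc, ih]
      · simp only [List.foldl_cons, hs, pvDed]
        rw [if_neg hc, if_neg hc, ih]
        simp
-- ---- port B invariants ----
def pvInvItems (docs : List (List (String × String))) : Prop :=
  ∀ p ∈ (pvBest docs).items, ∃ n : Nat, p.2.2 = (n : Int) ∧
    ∃ e, docs[n]? = some e ∧ pvSrc e = some p.1 ∧ pvKey e = p.2.1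

def pvInvUB (docs : List (List (String × String))) : Prop :=
  ∀ sk q, (pvBest docs).get? sk = some q →
    ∀ e ∈ docs, pvSrc e = some sk → pvGtKey (pvKey e) q.1 = false

def pvInvNone (docs : List (List (String × String))) : Prop :=
  ∀ sk, (pvBest docs).get? sk = none → ∀ e ∈ docs, pvSrc e ≠ some sk

theorem best_snoc (docs : List (List (String × String))) (d : List (String × String)) :
    pvBest (docs ++ [d]) =
      (match pvSrc d with
       | some sk =>
         match (pvBest docs).get? sk with
         | none => (pvBest docs).insert sk (pvKey d, (docs.length : Int))
         | some q => if pvGtKey (pvKey d) q.1 then (pvBest docs).insert sk (pvKey d, (docs.length : Int)) else pvBest docs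
       | none => pvBest docs) := by
  rw [pvBest, PySem.List.enumerate_append, PySem.List.enumerate_cons, PySem.List.enumerate_nil,
    List.foldl_append, List.foldl_cons, List.foldl_nil, zero_add]
  rfl

theorem dict_get?_none_iff (b : PySem.Dict String ((Int × String) × Int)) (k : String) :
    b.get? k = none ↔ b.contains k = false := by
  simp [PySem.Dict.get?, PySem.Dict.contains, List.find?_eq_none, List.any_eq_true]

theorem dict_get?_some_mem {b : PySem.Dict String ((Int × String) × Int)} {k : String}
    {v : (Int × String) × Int} (h : b.get? k = some v) : (k, v) ∈ b.items := by
  simp only [PySem.Dict.get?, Option.map_eq_some_iff] at h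
  obtain ⟨p, hp, hv⟩ := h
  have h1 := List.find?_some hp
  have h2 := List.mem_of_find?_eq_some hp
  have : p.1 = k := by simpa using h1
  have : p = (k, v) := by cases p; simp_all
  exact this ▸ h2

theorem winners_mem_iff (b : PySem.Dict String ((Int × String) × Int)) (j : Int) :
    (PySem.Set.ofList ((b.values).map (·.2))).contains j = true ↔ ∃ p ∈ b.items, p.2.2 = j := by
  rw [← set_mem_iff_contains, PySem.Set.mem_ofList]
  simp [PySem.Dict.values]

theorem enum_mem (docs : List (List (String × String))) {p : Int × List (String × String)}
    (hp : p ∈ PySem.List.enumerate docs) :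
    ∃ (k : Nat) (h : k < docs.length), p = ((k : Int), docs[k]) := by
  have := (PySem.List.mem_enumerate_iff (xs := docs) (s := 0) (p := p)).mp hp
  obtain ⟨k, h, he⟩ := this
  exact ⟨k, h, by simpa using he⟩

-- ---- selection-list recurrences ----
theorem sel_sub {y : List (String × String)} {docs : List (List (String × String))}
    (h : y ∈ pvSelected docs) : y ∈ docs := by
  unfold pvSelected at h
  rcases List.mem_map.mp h with ⟨p, hp, rfl⟩
  obtain ⟨k, hk, rfl⟩ := enum_mem docs (List.mem_of_mem_filter hp)
  exact List.getElem_mem hk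

theorem sel_snoc_none (docs : List (List (String × String))) (d : List (String × String))
    (hd : pvSrc d = none) : pvSelected (docs ++ [d]) = pvSelected docs ++ [d] := by
  unfold pvSelected
  rw [best_snoc, hd]
  rw [PySem.List.enumerate_append, PySem.List.enumerate_cons, PySem.List.enumerate_nil, zero_add,
    List.filter_append, List.map_append]
  congr 1
  simp [List.filter_cons, hd]

theorem sel_snoc_new (docs : List (List (String × String))) (d : List (String × String))
    (sk : String) (hd : pvSrc d = some sk) (hb : (pvBest docs).get? sk = none) :
    pvSelected (docs ++ [d]) = pvSelected docs ++ [d] := by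
  have hcont : (pvBest docs).contains sk = false := (dict_get?_none_iff _ _).mp hb
  have hitems : ((pvBest docs).insert sk (pvKey d, (docs.length : Int))).items
      = (pvBest docs).items ++ [(sk, (pvKey d, (docs.length : Int)))] := by
    simp [PySem.Dict.insert, hcont]
  unfold pvSelected
  rw [best_snoc]; simp only [hd, hb]
  rw [PySem.List.enumerate_append, PySem.List.enumerate_cons, PySem.List.enumerate_nil, zero_add,
    List.filter_append, List.map_append]
  congr 1
  · congr 1
    apply List.filter_congr
    intro p hp
    obtain ⟨k, hk, rfl⟩ := enum_mem docs hp
    cases hs : pvSrc (docs[k]) with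
    | none => simp [hs]
    | some sk0 =>
      simp only [hs]
      rw [Bool.eq_iff_iff, winners_mem_iff, winners_mem_iff, hitems]
      constructor
      · rintro ⟨p, hp, hpj⟩
        rcases List.mem_append.mp hp with hp | hp
        · exact ⟨p, hp, hpj⟩
        · simp at hp; subst hp; simp at hpj; omega
      · rintro ⟨p, hp, hpj⟩
        exact ⟨p, List.mem_append_left _ hp, hpj⟩
  · simp only [List.filter_cons, hd]
    rw [if_pos]
    · rfl
    · rw [winners_mem_iff, hitems]
      exact ⟨(sk, (pvKey d, (docs.length : Int))), List.mem_append_right _ (by simp), rfl⟩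

theorem map_snd_filter_and (l : List (Int × List (String × String)))
    (A : Int × List (String × String) → Bool) (G : List (String × String) → Bool) :
    (l.filter (fun p => A p && G p.2)).map (·.2) = ((l.filter A).map (·.2)).filter G := by
  induction l with
  | nil => rfl
  | cons x t ih => by_cases hA : A x <;> by_cases hG : G x.2 <;> simp [hA, hG, ih]

theorem sel_snoc_win (docs : List (List (String × String))) (d : List (String × String))
    (sk : String) (q : (Int × String) × Int) (hd : pvSrc d = some sk)
    (hb : (pvBest docs).get? sk = some q) (hgt : pvGtKey (pvKey d) q.1 = true)
    (hI : pvInvItems docs) :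
    pvSelected (docs ++ [d]) =
      (pvSelected docs).filter (fun y => !(pvSrc y == some sk)) ++ [d] := by
  have hcont : (pvBest docs).contains sk = true := by
    rcases h : (pvBest docs).contains sk with _ | _
    · rw [(dict_get?_none_iff _ _).mpr h] at hb; cases hb
    · rfl
  have hitems : ((pvBest docs).insert sk (pvKey d, (docs.length : Int))).items
      = (pvBest docs).items.map
          (fun p => if p.1 == sk then (sk, (pvKey d, (docs.length : Int))) else p) := by
    simp [PySem.Dict.insert, hcont]
  unfold pvSelected
  rw [best_snoc]; simp only [hd, hb]; rw [if_pos hgt]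
  rw [PySem.List.enumerate_append, PySem.List.enumerate_cons, PySem.List.enumerate_nil, zero_add,
    List.filter_append, List.map_append]
  congr 1
  · -- old part: new filter = old filter then drop the sk survivor
    have hstep : ∀ p ∈ PySem.List.enumerate docs,
        (fun (p : Int × List (String × String)) =>
          match pvSrc p.2 with
          | none => true
          | some _ => (PySem.Set.ofList
              ((((pvBest docs).insert sk (pvKey d, (docs.length : Int))).values).map (·.2))).contains p.1) p
        = ((fun (p : Int × List (String × String)) =>
            match pvSrc p.2 with
            | none => true
            | some _ => (PySem.Set.ofList (((pvBest docs).values).map (·.2))).contains p.1) p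
           && (!(pvSrc p.2 == some sk))) := by
      intro p hp
      obtain ⟨k, hk, rfl⟩ := enum_mem docs hp
      cases hs : pvSrc (docs[k]) with
      | none => simp [hs]
      | some sk0 =>
        simp only [hs]
        by_cases he : sk0 = sk
        · rw [he] at hs
          simp only [he, beq_self_eq_true, Bool.not_true, Bool.and_false]
          rw [Bool.eq_false_iff]
          intro hmem
          rw [winners_mem_iff, hitems] at hmem
          obtain ⟨p, hp', hpj⟩ := hmem
          rcases List.mem_map.mp hp' with ⟨r, hr, rfl⟩
          by_cases hrk : r.1 == sk
          · rw [if_pos hrk] at hpj; simp at hpj; omega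
          · rw [if_neg hrk] at hpj
            obtain ⟨n, hn, e, hne, hsrc, _⟩ := hI r hr
            rw [hn] at hpj
            have : n = k := by exact_mod_cast hpj
            subst this
            rw [List.getElem?_eq_getElem hk] at hne
            injection hne with hne; subst hne
            rw [hs] at hsrc; injection hsrc with hsrc
            exact absurd hsrc.symm (by simpa using hrk)
        · have hbe : ((some sk0 : Option String) == some sk) = false := by simp [he]
          rw [hbe]
          simp only [Bool.not_false, Bool.and_true]
          rw [Bool.eq_iff_iff, winners_mem_iff, winners_mem_iff, hitems]
          constructor
          · rintro ⟨p, hp', hpj⟩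
            rcases List.mem_map.mp hp' with ⟨r, hr, rfl⟩
            by_cases hrk : r.1 == sk
            · rw [if_pos hrk] at hpj; simp at hpj; omega
            · rw [if_neg hrk] at hpj; exact ⟨r, hr, hpj⟩
          · rintro ⟨r, hr, hpj⟩
            refine ⟨r, ?_, ?_⟩
            · have hrk : (r.1 == sk) = false := by
                obtain ⟨n, hn, e, hne, hsrc, _⟩ := hI r hr
                rw [hn] at hpj
                have : n = k := by exact_mod_cast hpj
                subst this
                rw [List.getElem?_eq_getElem hk] at hne
                injection hne with hne; subst hne
                rw [hs] at hsrc; injection hsrc with hsrc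
                exact beq_eq_false_iff_ne.mpr (fun hq => he (hsrc.trans hq))
              exact List.mem_map.mpr ⟨r, hr, by rw [if_neg (by simp [hrk])]⟩
            · exact hpj
    rw [List.filter_congr hstep]
    exact map_snd_filter_and (PySem.List.enumerate docs)
      (fun p =>
        match pvSrc p.2 with
        | none => true
        | some _ => (PySem.Set.ofList (((pvBest docs).values).map (·.2))).contains p.1)
      (fun y => !(pvSrc y == some sk))
  · simp only [List.filter_cons, hd]
    rw [if_pos]
    · rfl
    · rw [winners_mem_iff, hitems]
      refine ⟨(sk, (pvKey d, (docs.length : Int))), ?_, rfl⟩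
      exact List.mem_map.mpr ⟨(sk, q), dict_get?_some_mem hb, by simp⟩

theorem sel_snoc_lose (docs : List (List (String × String))) (d : List (String × String))
    (sk : String) (q : (Int × String) × Int) (hd : pvSrc d = some sk)
    (hb : (pvBest docs).get? sk = some q) (hgt : pvGtKey (pvKey d) q.1 = false)
    (hI : pvInvItems docs) :
    pvSelected (docs ++ [d]) = pvSelected docs := by
  unfold pvSelected
  rw [best_snoc]; simp only [hd, hb, hgt]
  rw [PySem.List.enumerate_append, PySem.List.enumerate_cons, PySem.List.enumerate_nil, zero_add,
    List.filter_append, List.map_append]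
  simp only [Bool.false_eq_true, ↓reduceIte]
  rw [List.filter_cons, if_neg, List.filter_nil]
  · simp
  · simp only [hd]
    rw [winners_mem_iff]
    rintro ⟨p, hp, hpj⟩
    obtain ⟨n, hn, e, hne, _, _⟩ := hI p hp
    rw [hn] at hpj
    have hlt : n < docs.length := (List.getElem?_eq_some_iff.mp hne).1
    omega

-- ---- invariant preservation ----
theorem inv_items_snoc {docs : List (List (String × String))} {d : List (String × String)}
    (hI : pvInvItems docs) : pvInvItems (docs ++ [d]) := by
  have lift : ∀ p ∈ (pvBest docs).items, ∃ n : Nat, p.2.2 = (n : Int) ∧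
      ∃ e, (docs ++ [d])[n]? = some e ∧ pvSrc e = some p.1 ∧ pvKey e = p.2.1 := by
    intro p hp
    obtain ⟨n, hn, e, hne, hsrc, hkey⟩ := hI p hp
    have hlt : n < docs.length := (List.getElem?_eq_some_iff.mp hne).1
    exact ⟨n, hn, e, by rw [List.getElem?_append_left hlt]; exact hne, hsrc, hkey⟩
  have hnew : ∃ n : Nat, ((docs.length : Int)) = (n : Int) ∧
      ∃ e, (docs ++ [d])[n]? = some e ∧ e = d := by
    exact ⟨docs.length, rfl, d, by simp, rfl⟩
  intro p hp
  rw [best_snoc] at hp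
  cases hs : pvSrc d with
  | none => simp only [hs] at hp; exact lift p hp
  | some sk =>
    simp only [hs] at hp
    cases hb : (pvBest docs).get? sk with
    | none =>
      simp only [hb] at hp
      have hcont : (pvBest docs).contains sk = false := (dict_get?_none_iff _ _).mp hb
      rw [show ((pvBest docs).insert sk (pvKey d, (docs.length : Int))).items
          = (pvBest docs).items ++ [(sk, (pvKey d, (docs.length : Int)))] by
        simp [PySem.Dict.insert, hcont]] at hp
      rcases List.mem_append.mp hp with hp | hp
      · exact lift p hp
      · simp only [List.mem_singleton] at hp; subst hp
        exact ⟨docs.length, rfl, d, by simp, hs, rfl⟩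
    | some q =>
      simp only [hb] at hp
      by_cases hgt : pvGtKey (pvKey d) q.1 = true
      · rw [if_pos hgt] at hp
        have hcont : (pvBest docs).contains sk = true := by
          rcases h : (pvBest docs).contains sk with _ | _
          · rw [(dict_get?_none_iff _ _).mpr h] at hb; cases hb
          · rfl
        rw [show ((pvBest docs).insert sk (pvKey d, (docs.length : Int))).items
            = (pvBest docs).items.map
                (fun p => if p.1 == sk then (sk, (pvKey d, (docs.length : Int))) else p) by
          simp [PySem.Dict.insert, hcont]] at hp
        rcases List.mem_map.mp hp with ⟨r, hr, rfl⟩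
        by_cases hrk : r.1 == sk
        · rw [if_pos hrk]
          exact ⟨docs.length, rfl, d, by simp, hs, rfl⟩
        · rw [if_neg hrk]
          exact lift r hr
      · rw [if_neg hgt] at hp
        exact lift p hp

theorem inv_ub_snoc {docs : List (List (String × String))} {d : List (String × String)}
    (hI : pvInvUB docs) (hN : pvInvNone docs) : pvInvUB (docs ++ [d]) := by
  intro sk' q' hq' e he hsrc
  rw [best_snoc] at hq'
  rcases List.mem_append.mp he with he | he
  · -- e is an old element
    cases hs : pvSrc d with
    | none =>
      simp only [hs] at hq'
      exact hI sk' q' hq' e he hsrc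
    | some sk =>
      simp only [hs] at hq'
      cases hb : (pvBest docs).get? sk with
      | none =>
        simp only [hb, PySem.Dict.get?_insert] at hq'
        by_cases hk : sk' = sk
        · exact absurd (hk ▸ hsrc) (hN sk hb e he)
        · rw [if_neg hk] at hq'; exact hI sk' q' hq' e he hsrc
      | some q =>
        simp only [hb] at hq'
        by_cases hgt : pvGtKey (pvKey d) q.1 = true
        · rw [if_pos hgt, PySem.Dict.get?_insert] at hq'
          by_cases hk : sk' = sk
          · rw [if_pos hk] at hq'; injection hq' with hq'; subst hq'
            have hub := hI sk q (hk ▸ hb) e he (hk ▸ hsrc)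
            rcases h : pvGtKey (pvKey e) (pvKey d) with _ | _
            · rfl
            · rw [pvGtKey_trans h hgt] at hub; cases hub
          · rw [if_neg hk] at hq'; exact hI sk' q' hq' e he hsrc
        · rw [if_neg hgt] at hq'; exact hI sk' q' hq' e he hsrc
  · -- e = d
    obtain rfl : e = d := by simpa using he
    cases hs : pvSrc e with
    | none => rw [hs] at hsrc; cases hsrc
    | some sk =>
      rw [hs] at hsrc; injection hsrc with hsrc
      simp only [hs] at hq'
      cases hb : (pvBest docs).get? sk with
      | none =>
        simp only [hb, PySem.Dict.get?_insert] at hq'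
        rw [if_pos hsrc.symm] at hq'
        injection hq' with hq'; subst hq'
        exact pvGtKey_irrefl _
      | some q =>
        simp only [hb] at hq'
        by_cases hgt : pvGtKey (pvKey e) q.1 = true
        · rw [if_pos hgt, PySem.Dict.get?_insert, if_pos hsrc.symm] at hq'
          injection hq' with hq'; subst hq'
          exact pvGtKey_irrefl _
        · rw [if_neg hgt, ← hsrc, hb] at hq'
          injection hq' with hq'; subst hq'
          exact Bool.eq_false_iff.mpr hgt

theorem inv_none_snoc {docs : List (List (String × String))} {d : List (String × String)}
    (hN : pvInvNone docs) : pvInvNone (docs ++ [d]) := by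
  intro sk' hq' e he
  rw [best_snoc] at hq'
  rcases List.mem_append.mp he with he | he
  · cases hs : pvSrc d with
    | none =>
      simp only [hs] at hq'
      exact hN sk' hq' e he
    | some sk =>
      simp only [hs] at hq'
      cases hb : (pvBest docs).get? sk with
      | none =>
        simp only [hb, PySem.Dict.get?_insert] at hq'
        by_cases hk : sk' = sk
        · rw [if_pos hk] at hq'; cases hq'
        · rw [if_neg hk] at hq'; exact hN sk' hq' e he
      | some q =>
        simp only [hb] at hq'
        by_cases hgt : pvGtKey (pvKey d) q.1 = true
        · rw [if_pos hgt, PySem.Dict.get?_insert] at hq'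
          by_cases hk : sk' = sk
          · rw [if_pos hk] at hq'; cases hq'
          · rw [if_neg hk] at hq'; exact hN sk' hq' e he
        · rw [if_neg hgt] at hq'; exact hN sk' hq' e he
  · obtain rfl : e = d := by simpa using he
    cases hs : pvSrc e with
    | none => exact fun h => by cases h
    | some sk =>
      simp only [hs] at hq'
      intro h; injection h with h; subst h
      cases hb : (pvBest docs).get? sk with
      | none =>
        simp only [hb, PySem.Dict.get?_insert] at hq'
        simp at hq'
      | some q =>
        simp only [hb] at hq'
        by_cases hgt : pvGtKey (pvKey e) q.1 = true
        · rw [if_pos hgt, PySem.Dict.get?_insert] at hq'; simp at hq'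
        · rw [if_neg hgt, hb] at hq'; cases hq'

-- ---- the master induction ----
theorem master (docs : List (List (String × String))) :
    pvInvItems docs ∧ pvInvUB docs ∧ pvInvNone docs ∧
    pvDed (pvSrt docs) PySem.Set.empty = pvSrt (pvSelected docs) := by
  induction docs using List.reverseRecOn with
  | nil =>
    refine ⟨?_, ?_, ?_, rfl⟩
    · intro p hp; simp [pvBest, PySem.List.enumerate_nil] at hp
    · intro sk q hq e he _; simp at he
    · intro sk hq e he; simp at he
  | append_singleton docs d ih =>
    obtain ⟨hItems, hUB, hNone, hMain⟩ := ih
    refine ⟨inv_items_snoc hItems, inv_ub_snoc hUB hNone, inv_none_snoc hNone, ?_⟩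
    have hSorted := srt_sorted docs
    rw [srt_append_singleton]
    cases hs : pvSrc d with
    | none =>
      rw [ded_insert_none hs hSorted, hMain, sel_snoc_none docs d hs, srt_append_singleton]
    | some sk =>
      cases hb : (pvBest docs).get? sk with
      | none =>
        have hall : ∀ e ∈ pvSrt docs, pvSrc e = some sk → pvGtKey (pvKey d) (pvKey e) = true := by
          intro e he hesrc
          exact absurd hesrc (hNone sk hb e (mem_srt.mp he))
        have hfilt : (pvSrt (pvSelected docs)).filter (fun y => !(pvSrc y == some sk))
            = pvSrt (pvSelected docs) := by
          apply List.filter_eq_self.mpr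
          intro y hy
          have := hNone sk hb y (sel_sub (mem_srt.mp hy))
          simpa using this
        rw [ded_insert_win hs hSorted hall PySem.Set.empty rfl, hMain, hfilt,
          sel_snoc_new docs d sk hs hb, srt_append_singleton]
      | some q =>
        by_cases hgt : pvGtKey (pvKey d) q.1 = true
        · have hall : ∀ e ∈ pvSrt docs, pvSrc e = some sk → pvGtKey (pvKey d) (pvKey e) = true := by
            intro e he hesrc
            exact pvGtKey_gt_of_gt_of_nle hgt (hUB sk q hb e (mem_srt.mp he) hesrc)
          rw [ded_insert_win hs hSorted hall PySem.Set.empty rfl, hMain,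
            sel_snoc_win docs d sk q hs hb hgt hItems, srt_append_singleton, srt_filter]
        · have hlose : (PySem.Set.empty : PySem.Set String).contains sk = true ∨
              ∃ w ∈ pvSrt docs, pvSrc w = some sk ∧ pvGtKey (pvKey d) (pvKey w) = false := by
            obtain ⟨n, hn, e, hne, hesrc, hekey⟩ := hItems (sk, q) (dict_get?_some_mem hb)
            refine Or.inr ⟨e, mem_srt.mpr ?_, hesrc, ?_⟩
            · have hlt : n < docs.length := (List.getElem?_eq_some_iff.mp hne).1
              rw [List.getElem?_eq_getElem hlt] at hne
              injection hne with hne; subst hne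
              exact List.getElem_mem hlt
            · rw [hekey]
              exact Bool.eq_false_iff.mpr hgt
          rw [ded_insert_lose hs hSorted PySem.Set.empty hlose, hMain,
            sel_snoc_lose docs d sk q hs hb (Bool.eq_false_iff.mpr hgt) hItems]

-- ===== VERDICT (by name: the statement is the Claim_ definition above) =====
theorem collapse_visible_file_docs_py_spec : Claim_equal_collapse_visible_file_docs_py := by
  intro docs _ _
  unfold Spec_collapse_visible_file_docs_py
  unfold collapse_visible_file_docs_py collapse_visible_file_docs_py_alt
  rw [srt_spec, srt_spec, foldA_spec]
  rw [List.nil_append]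
  exact (master docs).2.2.2
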